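-- pv_equiv track=rewrite | github.com/juanpablosotoc/blossom | code/backend/services/cherry_blossom/gutenberg/pipeline/processing/basic.py | escape_inner_quotes_in_attrs
-- ===== SOURCE A (Python) =====
-- def escape_inner_quotes_in_attrs(s: str) -> str:
--     out = []
--     i, n = 0, len(s)
--     in_tag = False
--     in_dq_attr = False
--
--     while i < n:
--         ch = s[i]
--         if not in_tag:
--             if ch == "<":
--                 in_tag = True
--             out.append(ch); i += 1; continue
--
--         # in tag
--         if not in_dq_attr:
--             out.append(ch)
--             if ch == ">":
--                 in_tag = False
--             elif ch == '"':
--                 in_dq_attr = True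
--             elif ch == "=":
--                 j = i + 1
--                 while j < n and s[j].isspace(): j += 1
--                 if j < n and s[j] == '"':
--                     i = j
--                     out.append('"')
--                     in_dq_attr = True
--             i += 1; continue
--         else:
--             # inside double-quoted value
--             if ch == '"':
--                 nxt = s[i + 1] if i + 1 < n else ""
--                 if nxt in (" ", ">", "/") or nxt == "":
--                     out.append('"')
--                     in_dq_attr = False
--                 else:
--                     out.append("&quot;")
--                 i += 1; continue
--             else:
--                 out.append(ch); i += 1; continue
--
--     return "".join(out)
-- ===== SOURCE B (Python) =====
-- def escape_inner_quotes_in_attrs(s: str) -> str: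
--     out = []
--     i, n = 0, len(s)
--     while i < n:
--         lt = s.find("<", i)
--         if lt == -1:
--             out.append(s[i:])
--             break
--         out.append(s[i:lt + 1])         # bulk-copy plain text including the '<'
--         i = _process_tag(s, lt + 1, out)
--     return "".join(out)
--
--
-- def _process_tag(s: str, i: int, out: list) -> int:
--     """Run the attribute state machine from i; consume up to and including the
--     unquoted '>' (or end of string), appending the escaped text to out."""
--     n = len(s)
--     in_dq = False
--     while i < n:
--         ch = s[i]
--         if not in_dq:
--             out.append(ch)
--             i += 1
--             if ch == ">":
--                 return i
--             if ch == '"':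
--                 in_dq = True
--             elif ch == "=":
--                 j = i
--                 while j < n and s[j].isspace():
--                     j += 1
--                 if j < n and s[j] == '"':
--                     out.append('"')
--                     i = j + 1
--                     in_dq = True
--         else:
--             if ch == '"':
--                 nxt = s[i + 1] if i + 1 < n else ""
--                 if nxt in (" ", ">", "/") or nxt == "":
--                     out.append('"')
--                     in_dq = False
--                 else:
--                     out.append("&quot;")
--             else:
--                 out.append(ch)
--             i += 1
--     return n
-- ===== Notes on version B (the rewrite author's own statement) =====
-- stated objective: faster
-- what changed: A's single char-by-char while-loop with in_tag/in_dq_attr flags is split into a bulk-copying outer loop that uses s.find to copy each plain-text slice in one shot plus a tag-local helper _process_tag that runs the attribute state machine to the end of the tag.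
import Mathlib
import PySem

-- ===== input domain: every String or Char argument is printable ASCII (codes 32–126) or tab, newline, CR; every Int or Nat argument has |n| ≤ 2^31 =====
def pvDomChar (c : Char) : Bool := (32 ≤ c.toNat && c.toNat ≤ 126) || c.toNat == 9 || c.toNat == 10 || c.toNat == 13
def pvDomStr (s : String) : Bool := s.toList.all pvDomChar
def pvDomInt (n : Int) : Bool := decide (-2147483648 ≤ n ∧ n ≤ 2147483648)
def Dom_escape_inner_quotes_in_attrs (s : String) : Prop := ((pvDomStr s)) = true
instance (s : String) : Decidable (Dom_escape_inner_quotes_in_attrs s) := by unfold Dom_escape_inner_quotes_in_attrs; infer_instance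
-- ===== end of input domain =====

-- B replaces A's single char-by-char state machine by a bulk-copying outer loop
-- (s.find locates the next tag opener, the plain-text slice is copied in one shot)
-- plus a tag-local helper running the attribute state machine; measured faster
-- in a timing run (constant-factor: bulk slice copies instead of a per-char loop).

-- ===== PORT A =====
-- A's single while-loop over index i with flags in_tag / in_dq_attr, as structural
-- recursion over the remaining characters: the '=' whitespace-skip jump of i becomes
-- dropWhile on the remainder (exactly the characters A skips), and the lookahead
-- 'nxt = s[i+1] if i+1 < n else ""' becomes the head? tests.
def pvLoopA : List Char → Bool → Bool → List Char
  | [], _, _ => []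
  | c :: cs, false, _ =>
    c :: pvLoopA cs (c == '<') false
  | c :: cs, true, false =>
    if c == '>' then c :: pvLoopA cs false false
    else if c == '"' then c :: pvLoopA cs true true
    else if c == '=' then
      match h : cs.dropWhile PySem.Chars.isspace with
      | '"' :: rest => '=' :: '"' :: pvLoopA rest true true
      | _ => '=' :: pvLoopA cs true false
    else c :: pvLoopA cs true false
  | c :: cs, true, true =>
    if c == '"' then
      if cs.head? == some ' ' || cs.head? == some '>' || cs.head? == some '/' || cs.head? == none
      then '"' :: pvLoopA cs true false
      else '&' :: 'q' :: 'u' :: 'o' :: 't' :: ';' :: pvLoopA cs true true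
    else c :: pvLoopA cs true true
  termination_by l => l.length
  decreasing_by
    all_goals simp_all
    have := List.length_dropWhile_le (p := PySem.Chars.isspace) (l := cs)
    rw [h] at this; simp at this; omega

def escape_inner_quotes_in_attrs (s : String) : String :=
  String.ofList (pvLoopA s.toList false false)

-- ===== PORT B =====
-- _process_tag: consumes the tag from the char after '<' up to and including the
-- unquoted '>' (or the end), returning (escaped output, remaining characters);
-- the 'j < n and s[j] == "' test and the nxt lookahead become head? tests.
def pvProcessTag : List Char → Bool → List Char × List Char
  | [], _ => ([], [])
  | c :: cs, false =>
    if c == '>' then ([c], cs)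
    else if c == '"' then
      (c :: (pvProcessTag cs true).1, (pvProcessTag cs true).2)
    else if c == '=' then
      if h : (cs.dropWhile PySem.Chars.isspace).head? = some '"' then
        ('=' :: '"' :: (pvProcessTag (cs.dropWhile PySem.Chars.isspace).tail true).1,
          (pvProcessTag (cs.dropWhile PySem.Chars.isspace).tail true).2)
      else
        ('=' :: (pvProcessTag cs false).1, (pvProcessTag cs false).2)
    else
      (c :: (pvProcessTag cs false).1, (pvProcessTag cs false).2)
  | c :: cs, true =>
    if c == '"' then
      if cs.head? == some ' ' || cs.head? == some '>' || cs.head? == some '/' || cs.head? == none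
      then ('"' :: (pvProcessTag cs false).1, (pvProcessTag cs false).2)
      else
        ('&' :: 'q' :: 'u' :: 'o' :: 't' :: ';' :: (pvProcessTag cs true).1,
          (pvProcessTag cs true).2)
    else
      (c :: (pvProcessTag cs true).1, (pvProcessTag cs true).2)
  termination_by l => l.length
  decreasing_by
    all_goals simp_all
    have h1 := List.length_dropWhile_le (p := PySem.Chars.isspace) (l := cs)
    omega

-- outer loop of Source B: s.find('<', i) becomes the takeWhile/dropWhile split of the
-- remainder; the plain-text slice up to and including the '<' is copied in one shot.
-- fuel = remaining outer iterations; each iteration consumes at least one character,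
-- so the initial fuel s.length is always enough and fuel 0 is never reached.
def pvLoopB : Nat → List Char → List Char
  | 0, l => l
  | fuel + 1, l =>
    match l.dropWhile (fun c => !(c == '<')) with
    | [] => l
    | c :: rest =>
      let p := pvProcessTag rest false
      l.takeWhile (fun c => !(c == '<')) ++ c :: (p.1 ++ pvLoopB fuel p.2)

def escape_inner_quotes_in_attrs_alt (s : String) : String :=
  String.ofList (pvLoopB s.toList.length s.toList)

-- ===== PRECONDITION & SPEC =====
def Spec_escape_inner_quotes_in_attrs (s : String) (out : String) : Prop := out = escape_inner_quotes_in_attrs_alt s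
instance (s : String) (out : String) : Decidable (Spec_escape_inner_quotes_in_attrs s out) := by unfold Spec_escape_inner_quotes_in_attrs; infer_instance

-- ===== CLAIM (what is proved, stated in full; the proofs are below) =====
def Claim_equal_escape_inner_quotes_in_attrs : Prop := ∀ (s : String), Dom_escape_inner_quotes_in_attrs s → Spec_escape_inner_quotes_in_attrs s (escape_inner_quotes_in_attrs s)

-- ===== LEMMAS AND PROOFS =====

-- the remainder returned by the tag helper never grows
theorem pvProcessTag_snd_le (l : List Char) (d : Bool) :
    (pvProcessTag l d).2.length ≤ l.length := by
  fun_induction pvProcessTag l d with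
  | case4 c cs hgt hq heq h ih =>
    have h1 := List.length_dropWhile_le (p := PySem.Chars.isspace) (l := cs)
    simp_all; omega
  | _ => simp_all <;> omega

-- inside a tag, A's loop produces the helper's output followed by whatever A
-- produces on the helper's remainder in the out-of-tag state
theorem pvLoopA_tag (l : List Char) (d : Bool) :
    pvLoopA l true d = (pvProcessTag l d).1 ++ pvLoopA (pvProcessTag l d).2 false false := by
  fun_induction pvProcessTag l d with
  | case1 d => simp [pvLoopA]
  | case2 c cs hgt => simp [pvLoopA, hgt]
  | case3 c cs hgt hq ih => simp [pvLoopA, hgt, hq, ih]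
  | case4 c cs hgt hq heq h ih =>
    obtain ⟨tl, hws⟩ : ∃ tl, cs.dropWhile PySem.Chars.isspace = '"' :: tl := by
      cases hd : cs.dropWhile PySem.Chars.isspace with
      | nil => rw [hd] at h; simp at h
      | cons a as => rw [hd] at h; simp at h; exact ⟨as, by rw [h]⟩
    rw [hws] at ih; simp only [List.tail_cons] at ih
    rw [pvLoopA.eq_def]
    simp only [hgt, hq, heq, if_true, if_false, Bool.false_eq_true]
    split
    · rename_i rest2 heq2
      rw [hws] at heq2; cases heq2
      rw [hws]; simpa using ih
    · rename_i hne; exact absurd hws (by intro hc; exact (hne _ hc).elim)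
  | case5 c cs hgt hq heq h ih =>
    rw [pvLoopA.eq_def]
    simp only [hgt, hq, heq, if_true, if_false, Bool.false_eq_true]
    split
    · rename_i rest2 heq2
      rw [heq2] at h; simp at h
    · simpa using ih
  | case6 c cs hgt hq heq ih => simp [pvLoopA, hgt, hq, heq, ih]
  | case7 c cs hq hcond ih => rw [pvLoopA.eq_def]; simp_all
  | case8 c cs hq hcond ih => rw [pvLoopA.eq_def]; simp_all
  | case9 c cs hq ih => rw [pvLoopA.eq_def]; simp_all

-- head of a dropWhile result fails the predicate
theorem pvDropWhile_head_false {p : Char → Bool} {l : List Char} {c : Char} {rest : List Char}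
    (h : l.dropWhile p = c :: rest) : p c = false := by
  induction l with
  | nil => simp at h
  | cons a as ih =>
    by_cases hp : p a = true
    · rw [List.dropWhile_cons_of_pos hp] at h; exact ih h
    · rw [List.dropWhile_cons_of_neg hp] at h
      cases h; simpa using hp

-- plain text up to a '<' is passed through unchanged by A
theorem pvLoopA_pre (pre : List Char) (rest : List Char)
    (hpre : ∀ c ∈ pre, ¬ c = '<') :
    pvLoopA (pre ++ rest) false false = pre ++
      (match rest with
       | [] => []
       | c :: cs => c :: pvLoopA cs (c == '<') false) := by
  induction pre with
  | nil => cases rest <;> simp [pvLoopA]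
  | cons c cs ih =>
    have hc : (c == '<') = false := by simpa using hpre c (by simp)
    simp only [List.cons_append, pvLoopA, hc]
    rw [ih (fun x hx => hpre x (by simp [hx]))]

theorem pvLoopA_eq_pvLoopB (n : Nat) (l : List Char) (hn : l.length ≤ n) :
    pvLoopA l false false = pvLoopB n l := by
  induction n generalizing l with
  | zero =>
    have : l = [] := by cases l <;> simp_all
    subst this; simp [pvLoopA, pvLoopB]
  | succ n ih =>
    rw [pvLoopB]
    split
    · rename_i h
      have hall : ∀ c ∈ l, ¬ c = '<' := by
        intro c hc
        have := List.dropWhile_eq_nil_iff.mp h c hc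
        simpa using this
      have := pvLoopA_pre l [] hall
      simpa using this
    · rename_i c rest h
      have hsplit : l.takeWhile (fun c => !(c == '<')) ++ c :: rest = l := by
        conv_rhs => rw [← List.takeWhile_append_dropWhile (p := fun c => !(c == '<')) (l := l)]
        rw [h]
      have hpre : ∀ x ∈ l.takeWhile (fun c => !(c == '<')), ¬ x = '<' := by
        intro x hx
        have := List.mem_takeWhile_imp hx
        simpa using this
      have hc : c = '<' := by
        have := pvDropWhile_head_false h
        simpa using this
      have hfuel : (pvProcessTag rest false).2.length ≤ n := by
        have h1 := pvProcessTag_snd_le rest false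
        have h2 : rest.length < l.length := by
          have := congrArg List.length hsplit
          simp at this; omega
        omega
      calc pvLoopA l false false
          = pvLoopA (l.takeWhile (fun c => !(c == '<')) ++ c :: rest) false false := by
            rw [hsplit]
        _ = l.takeWhile (fun c => !(c == '<')) ++ c :: pvLoopA rest (c == '<') false := by
            rw [pvLoopA_pre _ _ hpre]
        _ = l.takeWhile (fun c => !(c == '<')) ++
              c :: ((pvProcessTag rest false).1 ++ pvLoopB n (pvProcessTag rest false).2) := by
            rw [hc]; simp only [beq_self_eq_true]
            rw [pvLoopA_tag, ih _ hfuel]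

-- ===== VERDICT (by name: the statement is the Claim_ definition above) =====
theorem escape_inner_quotes_in_attrs_spec : Claim_equal_escape_inner_quotes_in_attrs := by
  intro s _
  unfold Spec_escape_inner_quotes_in_attrs escape_inner_quotes_in_attrs escape_inner_quotes_in_attrs_alt
  rw [pvLoopA_eq_pvLoopB _ _ (le_refl _)]
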